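-- pv_equiv track=rewrite | github.com/chchaeun/study-algorithm | 프로그래머스/Lv.2/220303_68645.py | solution
-- ===== SOURCE A (Python) =====
-- def solution(n):
--     tri = [[0]*i for i in range(1, n+1)]
--     down = True
--     number = 1
--     flag=1
--     floor = len(tri)-1
--     down_i_start, down_i_end = 0, len(tri)
--     up_i_start, up_i_end = len(tri)-1, -1
--     j_level = 0
--     while flag==1:
--         flag=0
--         if down:
--             for i in range(down_i_start, down_i_end):
--                 for j in range(j_level, len(tri[i])-j_level):
--                     if tri[i][j]==0:
--                         tri[i][j] = number
--                         number+=1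
--                         if floor!=i:
--                             break
--             floor-=1
--             down_i_start+=2
--             down_i_end -=1
--
--         else:
--             for i in range(up_i_start, up_i_end, -1):
--                 for j in range(len(tri[i])-1-j_level, -1+j_level, -1):
--                     if tri[i][j] == 0:
--                         tri[i][j] = number
--                         number+=1
--                         break
--             j_level+=1
--             up_i_start-=1
--             up_i_end+=2
--         down = not down
--         for t in tri:
--             if 0 in t:
--                 flag=1
--     answer = []
--     for t in tri:
--         answer.extend(t)
--     return answer
-- ===== SOURCE B (Python) =====
-- def solution(n):
--     # Closed-form per cell: O(1) arithmetic per entry instead of repeated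
--     # rescanning passes over the triangle.
--     total = n * (n + 1) // 2
--     answer = []
--     for i in range(n):
--         for j in range(i + 1):
--             l = min(j, i - j, n - 1 - i)        # layer (distance to nearest edge)
--             m = n - 3 * l                        # side of the layer's triangle
--             s = total - m * (m + 1) // 2         # numbers used by outer layers
--             i2, j2 = i - 2 * l, j - l            # local coordinates in the layer
--             if j2 == 0:
--                 v = s + i2 + 1                   # left edge, going down
--             elif i2 == m - 1:
--                 v = s + m + j2                   # bottom edge, going right
--             else:
--                 v = s + 2 * m - 1 + (m - 1 - i2) # right edge, going up
--             answer.append(v)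
--     return answer
-- ===== Notes on version B (the rewrite author's own statement) =====
-- stated objective: faster
-- what changed: A repeatedly re-scans the whole triangle for remaining zero cells (a flag-driven while loop of alternating down/up passes, each pass searching rows for their first unfilled cell); B computes every cell's snail value directly from a closed-form formula (layer index, layer start offset, position on the layer's left/bottom/right edge) in a single pass over the cells. Intended as faster (O(n^2) vs O(n^3)); a timing run measured B 9.56x faster at the largest size both versions finished (n=256), unconfirmed beyond that because both time out on the huge-n inputs.
import Mathlib
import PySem

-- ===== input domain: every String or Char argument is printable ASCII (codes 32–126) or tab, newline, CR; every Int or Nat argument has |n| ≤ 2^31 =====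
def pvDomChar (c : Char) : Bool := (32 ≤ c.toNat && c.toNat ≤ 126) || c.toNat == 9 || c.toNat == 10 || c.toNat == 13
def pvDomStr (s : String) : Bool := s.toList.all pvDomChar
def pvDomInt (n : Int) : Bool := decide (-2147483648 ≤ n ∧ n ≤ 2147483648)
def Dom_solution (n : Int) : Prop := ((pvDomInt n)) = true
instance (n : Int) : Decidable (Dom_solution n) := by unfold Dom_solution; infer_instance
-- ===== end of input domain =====

-- B replaces A's repeated zero-scanning passes by a closed-form value for each cell.

-- ===== PORT A =====
-- inner j-loop of the down phase: fill first zero (break), or every zero when i is the floor row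
def fillDown (t : List Int) (number : Int) (isFloor : Bool) : List Int → List Int × Int
  | [] => (t, number)
  | j :: js =>
    if PySem.List.pyGetD t j 0 = 0 then
      if isFloor then fillDown (PySem.List.pySetD t j number) (number + 1) isFloor js
      else (PySem.List.pySetD t j number, number + 1)
    else fillDown t number isFloor js

-- inner j-loop of the up phase: fill the first zero scanned from the right, then break
def fillUp (t : List Int) (number : Int) : List Int → List Int × Int
  | [] => (t, number)
  | j :: js =>
    if PySem.List.pyGetD t j 0 = 0 then (PySem.List.pySetD t j number, number + 1)
    else fillUp t number js

def downPhase (tri : List (List Int)) (number floor dis die jl : Int) :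
    List (List Int) × Int :=
  (PySem.List.pyRange dis die 1).foldl
    (fun st i =>
      let t := PySem.List.pyGetD st.1 i []
      let r := fillDown t st.2 (decide (floor = i))
        (PySem.List.pyRange jl (PySem.List.len t - jl) 1)
      (PySem.List.pySetD st.1 i r.1, r.2))
    (tri, number)

def upPhase (tri : List (List Int)) (number jl uis uie : Int) :
    List (List Int) × Int :=
  (PySem.List.pyRange uis uie (-1)).foldl
    (fun st i =>
      let t := PySem.List.pyGetD st.1 i []
      let r := fillUp t st.2
        (PySem.List.pyRange (PySem.List.len t - 1 - jl) (-1 + jl) (-1))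
      (PySem.List.pySetD st.1 i r.1, r.2))
    (tri, number)

-- 'for t in tri: if 0 in t: flag = 1'
def flagOf (tri : List (List Int)) : Int :=
  tri.foldl (fun fl t => if t.contains 0 then 1 else fl) 0

-- the 'while flag == 1' loop; fuel only makes it total (n.toNat + 2 iterations
-- provably suffice, see the proofs below)
def loopA (fuel : Nat) (tri : List (List Int)) (down : Bool)
    (number floor dis die uis uie jl : Int) : List (List Int) :=
  match fuel with
  | 0 => tri
  | fuel + 1 =>
    if down then
      let r := downPhase tri number floor dis die jl
      if flagOf r.1 = 1 then
        loopA fuel r.1 false r.2 (floor - 1) (dis + 2) (die - 1) uis uie jl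
      else r.1
    else
      let r := upPhase tri number jl uis uie
      if flagOf r.1 = 1 then
        loopA fuel r.1 true r.2 floor dis die (uis - 1) (uie + 2) (jl + 1)
      else r.1

def solution (n : Int) : List Int :=
  -- [[0]*i for i in range(1, n+1)]; i ≥ 1 in the range, so List.replicate i.toNat is exact
  let tri := (PySem.List.pyRange 1 (n + 1) 1).map (fun i => List.replicate i.toNat (0 : Int))
  let L : Int := PySem.List.len tri
  let res := loopA (n.toNat + 2) tri true 1 (L - 1) 0 L (L - 1) (-1) 0
  res.foldl (fun acc t => acc ++ t) []

-- ===== PORT B =====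
def solution_alt (n : Int) : List Int :=
  let total := PySem.Int.floordiv (n * (n + 1)) 2
  (PySem.List.pyRange 0 n 1).foldl
    (fun answer i =>
      (PySem.List.pyRange 0 (i + 1) 1).foldl
        (fun answer j =>
          let l := min j (min (i - j) (n - 1 - i))
          let m := n - 3 * l
          let s := total - PySem.Int.floordiv (m * (m + 1)) 2
          let i2 := i - 2 * l
          let j2 := j - l
          let v :=
            if j2 = 0 then s + i2 + 1
            else if i2 = m - 1 then s + m + j2
            else s + 2 * m - 1 + (m - 1 - i2)
          answer ++ [v])
        answer)
    []

-- ===== PRECONDITION & SPEC =====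
def Spec_solution (n : Int) (out : List Int) : Prop := out = solution_alt n
instance (n : Int) (out : List Int) : Decidable (Spec_solution n out) := by unfold Spec_solution; infer_instance

-- ===== CLAIM (what is proved, stated in full; the proofs are below) =====
def Claim_equal_solution : Prop := ∀ (n : Int), Dom_solution n → Spec_solution n (solution n)

-- ===== LEMMAS AND PROOFS =====

-- closed-form cell value, identical to the body of solution_alt's inner fold
def TT (x : Int) : Int := PySem.Int.floordiv (x * (x + 1)) 2

def lay (n i j : Int) : Int := min j (min (i - j) (n - 1 - i))

def fA (n i j : Int) : Int :=
  let l := lay n i j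
  let m := n - 3 * l
  let s := TT n - TT m
  let i2 := i - 2 * l
  let j2 := j - l
  if j2 = 0 then s + i2 + 1
  else if i2 = m - 1 then s + m + j2
  else s + 2 * m - 1 + (m - 1 - i2)

def SS (n k : Int) : Int := TT n - TT (n - 3 * k)

-- triangle states: fully-filled layers < k, plus the partially filled layer k
def cellK (n k i j : Int) : Int := if lay n i j < k then fA n i j else 0
def cellD (n k a i j : Int) : Int :=
  if lay n i j < k ∨ (lay n i j = k ∧ j = k ∧ i < a) then fA n i j else 0
def cellH (n k i j : Int) : Int :=
  if lay n i j < k ∨ (lay n i j = k ∧ (j = k ∨ i = n - 1 - k)) then fA n i j else 0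
def cellU (n k a i j : Int) : Int :=
  if lay n i j < k ∨ (lay n i j = k ∧ (j = k ∨ i = n - 1 - k ∨ (j = i - k ∧ a < i)))
  then fA n i j else 0

def triOf (n : Int) (c : Int → Int → Int) : List (List Int) :=
  (PySem.List.pyRange 0 n 1).map (fun i => (PySem.List.pyRange 0 (i + 1) 1).map (fun j => c i j))

-- generic range-map utilities
lemma mapRange_congr {α : Type} (a b : Int) (f g : Int → α)
    (h : ∀ x, a ≤ x → x < b → f x = g x) :
    (PySem.List.pyRange a b 1).map f = (PySem.List.pyRange a b 1).map g := by
  apply List.map_congr_left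
  intro x hx
  rw [PySem.List.mem_pyRange_one] at hx
  exact h x hx.1 hx.2

lemma pySetD_map_pyRange {α : Type} (f : Int → α) (n i : Int) (v : α)
    (h0 : 0 ≤ i) (h : i < n) :
    PySem.List.pySetD ((PySem.List.pyRange 0 n 1).map f) i v
      = (PySem.List.pyRange 0 n 1).map (fun x => if x = i then v else f x) := by
  rw [PySem.List.pySetD_of_nonneg _ _ h0]
  apply List.ext_getElem
  · simp
  · intro t ht1 ht2
    simp only [List.length_set, List.length_map, PySem.List.length_pyRange_one] at ht1 ht2
    rw [List.getElem_set]
    simp only [List.getElem_map, PySem.List.getElem_pyRange_one]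
    by_cases hc : i.toNat = t
    · rw [if_pos hc, if_pos (by omega)]
    · rw [if_neg hc, if_neg (by omega)]

lemma pyGetD_triOf (n : Int) (c : Int → Int → Int) (i : Int) (h0 : 0 ≤ i) (h : i < n) :
    PySem.List.pyGetD (triOf n c) i []
      = (PySem.List.pyRange 0 (i + 1) 1).map (fun j => c i j) := by
  unfold triOf
  exact PySem.List.pyGetD_map_pyRange_of_nonneg _ n i [] h0 h

lemma len_map_pyRange {α : Type} (b : Int) (f : Int → α) (hb : 0 ≤ b) :
    PySem.List.len ((PySem.List.pyRange 0 b 1).map f) = b := by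
  simp only [PySem.List.len_eq, List.length_map, PySem.List.length_pyRange_one]
  omega

-- arithmetic about TT / SS / fA
lemma TT_two (x : Int) : 2 * TT x = x * (x + 1) := by
  obtain ⟨q, hq⟩ := Int.even_mul_succ_self x
  unfold TT
  rw [hq, show PySem.Int.floordiv (q + q) 2 = q from
    (PySem.Int.floordiv_eq_iff_of_pos (by norm_num)).2 ⟨by omega, by omega⟩]
  omega

lemma SS_zero (n : Int) : SS n 0 = 0 := by
  simp [SS]

lemma SS_succ (n k : Int) : SS n (k + 1) = SS n k + 3 * (n - 3 * k) - 3 := by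
  have h1 := TT_two (n - 3 * k)
  have h2 := TT_two (n - 3 * (k + 1))
  have h3 : 2 * TT (n - 3 * k) - 2 * TT (n - 3 * (k + 1)) = 6 * (n - 3 * k) - 6 := by
    rw [h1, h2]; ring
  unfold SS
  omega

lemma fA_pos (n i j : Int) (h0 : 0 ≤ j) (hj : j ≤ i) (hi : i < n) : 1 ≤ fA n i j := by
  have hl : 0 ≤ lay n i j ∧ lay n i j ≤ j ∧ lay n i j ≤ i - j ∧ lay n i j ≤ n - 1 - i := by
    unfold lay; omega
  have h1 := TT_two n
  have h2 := TT_two (n - 3 * lay n i j)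
  have hs : 0 ≤ TT n - TT (n - 3 * lay n i j) := by
    nlinarith [mul_nonneg (show (0:Int) ≤ 3 * lay n i j from by omega)
      (show (0:Int) ≤ n + (n - 3 * lay n i j) + 1 from by omega)]
  simp only [fA]
  split_ifs <;> omega

lemma fA_left (n k i : Int) (hk : 0 ≤ k) (h1 : 2 * k ≤ i) (h2 : i ≤ n - 1 - k) :
    fA n i k = SS n k + (i - 2 * k) + 1 := by
  have hlay : lay n i k = k := by unfold lay; omega
  simp only [fA, hlay, SS]
  split_ifs <;> omega

lemma fA_bottom (n k j : Int) (hk : 0 ≤ k) (h1 : k ≤ j) (h2 : j ≤ n - 1 - 2 * k) :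
    fA n (n - 1 - k) j = SS n k + (n - 3 * k) + (j - k) := by
  have hlay : lay n (n - 1 - k) j = k := by unfold lay; omega
  simp only [fA, hlay, SS]
  split_ifs <;> omega

lemma fA_right (n k i : Int) (hk : 0 ≤ k) (h1 : 2 * k + 1 ≤ i) (h2 : i ≤ n - 2 - k) :
    fA n i (i - k) = SS n k + 3 * (n - 3 * k) - 2 - (i - 2 * k) := by
  have hlay : lay n i (i - k) = k := by unfold lay; omega
  simp only [fA, hlay, SS]
  split_ifs <;> omega

-- fill loops
lemma fillUp_none (t : List Int) (number : Int) (js : List Int)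
    (h : ∀ j ∈ js, PySem.List.pyGetD t j 0 ≠ 0) : fillUp t number js = (t, number) := by
  induction js with
  | nil => rfl
  | cons j js ih =>
    simp only [fillUp]
    rw [if_neg (h j (List.mem_cons_self))]
    exact ih (fun x hx => h x (List.mem_cons_of_mem _ hx))

lemma fillDown_all (L : Int) (f : Int → Int) (number a b : Int)
    (h0 : 0 ≤ a) (hab : a ≤ b) (hb : b ≤ L)
    (hz : ∀ j, a ≤ j → j < b → f j = 0) :
    fillDown ((PySem.List.pyRange 0 L 1).map f) number true (PySem.List.pyRange a b 1)
      = ((PySem.List.pyRange 0 L 1).map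
          (fun j => if a ≤ j ∧ j < b then number + (j - a) else f j), number + (b - a)) := by
  obtain ⟨cnt, hcnt⟩ : ∃ cnt : Nat, b - a = (cnt : Int) := ⟨(b - a).toNat, by omega⟩
  clear hab
  revert h0 hz hcnt
  revert a f number
  induction cnt with
  | zero =>
    intro f number a h0 hz hcnt
    rw [PySem.List.pyRange_one_eq_nil (by omega : b ≤ a)]
    simp only [fillDown]
    rw [mapRange_congr 0 L f (fun j => if a ≤ j ∧ j < b then number + (j - a) else f j)
      (fun x h1 h2 => by beta_reduce; rw [if_neg (by omega)])]
    congr 1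
    omega
  | succ cnt ih =>
    intro f number a h0 hz hcnt
    rw [PySem.List.pyRange_one_cons (by omega : a < b)]
    simp only [fillDown]
    rw [PySem.List.pyGetD_map_pyRange_of_nonneg f L a 0 (by omega) (by omega),
      hz a (by omega) (by omega), if_pos rfl, if_pos trivial,
      pySetD_map_pyRange f L a number (by omega) (by omega),
      ih (fun x => if x = a then number else f x) (number + 1) (a + 1) (by omega)
        (fun j hj1 hj2 => by
          beta_reduce
          rw [if_neg (by omega)]
          exact hz j (by omega) hj2)
        (by omega)]
    rw [mapRange_congr 0 L
      (fun j => if a + 1 ≤ j ∧ j < b then number + 1 + (j - (a + 1))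
        else if j = a then number else f j)
      (fun j => if a ≤ j ∧ j < b then number + (j - a) else f j)
      (fun x h1 h2 => by beta_reduce; split_ifs <;> omega)]
    congr 1
    omega

-- zero-flag characterisation
lemma flag_eq (l : List (List Int)) (fl : Int) :
    l.foldl (fun fl t => if t.contains 0 then 1 else fl) fl
      = if l.any (·.contains (0 : Int)) then 1 else fl := by
  induction l generalizing fl with
  | nil => rfl
  | cons t l ih =>
    simp only [List.foldl_cons, List.any_cons]
    rw [ih]
    by_cases h : (0 : Int) ∈ t
    · simp [h]
    · simp [h]

lemma any_zero (n : Int) (c : Int → Int → Int) :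
    (triOf n c).any (·.contains (0 : Int)) = true
      ↔ ∃ i j, 0 ≤ j ∧ j ≤ i ∧ i < n ∧ c i j = 0 := by
  unfold triOf
  simp only [List.contains_eq_mem, List.any_map, List.any_eq_true, PySem.List.mem_pyRange_one,
    Function.comp_apply, List.mem_map, Order.lt_add_one_iff, decide_eq_true_eq]
  constructor
  · rintro ⟨i, ⟨hi0, hin⟩, j, ⟨hj0, hji⟩, hz⟩
    exact ⟨i, j, hj0, hji, hin, hz⟩
  · rintro ⟨i, j, hj0, hji, hin, hz⟩
    exact ⟨i, ⟨by omega, hin⟩, j, ⟨hj0, hji⟩, hz⟩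

lemma cell_if_zero (n i j : Int) (P : Prop) [Decidable P]
    (h0 : 0 ≤ j) (hj : j ≤ i) (hi : i < n) :
    ((if P then fA n i j else 0) = 0 ↔ ¬ P) := by
  have := fA_pos n i j h0 hj hi
  split_ifs with hp
  · constructor
    · intro h; omega
    · intro h; exact absurd hp h
  · simp [hp]

lemma triOf_congr (n : Int) (c1 c2 : Int → Int → Int)
    (h : ∀ i j, 0 ≤ i → i < n → 0 ≤ j → j ≤ i → c1 i j = c2 i j) :
    triOf n c1 = triOf n c2 := by
  unfold triOf
  apply mapRange_congr
  intro i h1 h2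
  apply mapRange_congr
  intro j h3 h4
  exact h i j h1 h2 h3 (by omega)

lemma flag_triH (n k : Int) (hk : 0 ≤ k) (hm : 1 ≤ n - 3 * k) :
    flagOf (triOf n (cellH n k)) = if 3 ≤ n - 3 * k then 1 else 0 := by
  unfold flagOf
  rw [flag_eq]
  by_cases h3 : 3 ≤ n - 3 * k
  · rw [if_pos h3, if_pos]
    rw [any_zero]
    refine ⟨2 * k + 1, k + 1, by omega, by omega, by omega, ?_⟩
    rw [show cellH n k (2 * k + 1) (k + 1)
        = if lay n (2 * k + 1) (k + 1) < k ∨ (lay n (2 * k + 1) (k + 1) = k ∧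
            (k + 1 = k ∨ 2 * k + 1 = n - 1 - k)) then fA n (2 * k + 1) (k + 1) else 0 from rfl]
    rw [cell_if_zero n (2 * k + 1) (k + 1) _ (by omega) (by omega) (by omega)]
    unfold lay
    omega
  · rw [if_neg h3, if_neg]
    rw [any_zero]
    rintro ⟨i, j, hj0, hji, hin, hz⟩
    rw [show cellH n k i j = if lay n i j < k ∨ (lay n i j = k ∧ (j = k ∨ i = n - 1 - k))
        then fA n i j else 0 from rfl] at hz
    rw [cell_if_zero n i j _ hj0 hji hin] at hz
    unfold lay at hz
    omega

lemma flag_triK (n k : Int) (hk : 0 ≤ k) :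
    flagOf (triOf n (cellK n k)) = if 1 ≤ n - 3 * k then 1 else 0 := by
  unfold flagOf
  rw [flag_eq]
  by_cases h1 : 1 ≤ n - 3 * k
  · rw [if_pos h1, if_pos]
    rw [any_zero]
    refine ⟨2 * k, k, by omega, by omega, by omega, ?_⟩
    rw [show cellK n k (2 * k) k = if lay n (2 * k) k < k then fA n (2 * k) k else 0 from rfl]
    rw [cell_if_zero n (2 * k) k _ (by omega) (by omega) (by omega)]
    unfold lay
    omega
  · rw [if_neg h1, if_neg]
    rw [any_zero]
    rintro ⟨i, j, hj0, hji, hin, hz⟩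
    rw [show cellK n k i j = if lay n i j < k then fA n i j else 0 from rfl] at hz
    rw [cell_if_zero n i j _ hj0 hji hin] at hz
    unfold lay at hz
    omega

-- down phase
lemma downPhase_aux (n k : Int) (hk : 0 ≤ k) (hm : 1 ≤ n - 3 * k) :
    ∀ (cnt : Nat) (a : Int), a = n - 1 - k - cnt → 2 * k ≤ a →
    (PySem.List.pyRange a (n - k) 1).foldl
      (fun st i =>
        let t := PySem.List.pyGetD st.1 i []
        let r := fillDown t st.2 (decide (n - 1 - k = i))
          (PySem.List.pyRange k (PySem.List.len t - k) 1)
        (PySem.List.pySetD st.1 i r.1, r.2))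
      (triOf n (cellD n k a), SS n k + 1 + (a - 2 * k))
      = (triOf n (cellH n k), SS n k + 2 * (n - 3 * k)) := by
  intro cnt
  induction cnt with
  | zero =>
    intro a ha h2k
    have haeq : a = n - 1 - k := by omega
    subst haeq
    rw [PySem.List.pyRange_one_cons (by omega : n - 1 - k < n - k), List.foldl_cons,
      PySem.List.pyRange_one_eq_nil (by omega : n - k ≤ n - 1 - k + 1), List.foldl_nil]
    simp only [pyGetD_triOf n (cellD n k (n - 1 - k)) (n - 1 - k) (by omega) (by omega),
      len_map_pyRange (n - 1 - k + 1) _ (by omega),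
      decide_true]
    rw [fillDown_all (n - 1 - k + 1) (fun j => cellD n k (n - 1 - k) (n - 1 - k) j) _ k
      (n - 1 - k + 1 - k) (by omega) (by omega) (by omega)
      (fun j hj1 hj2 => by
        beta_reduce
        unfold cellD
        rw [if_neg (by unfold lay; omega)])]
    dsimp only
    rw [mapRange_congr 0 (n - 1 - k + 1)
      (fun j => if k ≤ j ∧ j < n - 1 - k + 1 - k then SS n k + 1 + (n - 1 - k - 2 * k) + (j - k)
        else cellD n k (n - 1 - k) (n - 1 - k) j)
      (fun j => cellH n k (n - 1 - k) j)
      (fun x h1 h2 => by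
        beta_reduce
        by_cases hx : k ≤ x ∧ x < n - 1 - k + 1 - k
        · rw [if_pos hx]
          unfold cellH
          rw [if_pos (by unfold lay; omega), fA_bottom n k x hk (by omega) (by omega)]
          omega
        · rw [if_neg hx]
          unfold cellD cellH lay
          split_ifs <;> omega)]
    unfold triOf
    rw [pySetD_map_pyRange _ n (n - 1 - k) _ (by omega) (by omega)]
    rw [mapRange_congr 0 n _ (fun i => (PySem.List.pyRange 0 (i + 1) 1).map
        (fun j => cellH n k i j))
      (fun x h1 h2 => by
        beta_reduce
        by_cases hx : x = n - 1 - k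
        · rw [if_pos hx, hx]
        · rw [if_neg hx]
          exact mapRange_congr 0 (x + 1) _ _ (fun j hj1 hj2 => by
            beta_reduce
            unfold cellD cellH lay
            split_ifs <;> omega))]
    show (_, _) = (_, _)
    rw [Prod.mk.injEq]
    exact ⟨rfl, by omega⟩
  | succ cnt ih =>
    intro a ha h2k
    have halt : a < n - 1 - k := by omega
    rw [PySem.List.pyRange_one_cons (by omega : a < n - k), List.foldl_cons]
    simp only [pyGetD_triOf n (cellD n k a) a (by omega) (by omega),
      len_map_pyRange (a + 1) _ (by omega),
      decide_eq_false (show ¬ (n - 1 - k = a) from by omega)]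
    rw [PySem.List.pyRange_one_cons (by omega : k < a + 1 - k)]
    simp only [fillDown]
    rw [PySem.List.pyGetD_map_pyRange_of_nonneg _ (a + 1) k 0 (by omega) (by omega)]
    rw [show cellD n k a a k = 0 from by unfold cellD; rw [if_neg (by unfold lay; omega)]]
    rw [if_pos rfl, if_neg Bool.false_ne_true]
    dsimp only
    rw [pySetD_map_pyRange _ (a + 1) k _ (by omega) (by omega)]
    rw [mapRange_congr 0 (a + 1)
      (fun x => if x = k then SS n k + 1 + (a - 2 * k) else cellD n k a a x)
      (fun j => cellD n k (a + 1) a j)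
      (fun x h1 h2 => by
        beta_reduce
        by_cases hx : x = k
        · rw [if_pos hx, hx]
          unfold cellD
          rw [if_pos (by unfold lay; omega), fA_left n k a hk (by omega) (by omega)]
          omega
        · rw [if_neg hx]
          unfold cellD lay
          split_ifs <;> omega)]
    unfold triOf
    rw [pySetD_map_pyRange _ n a _ (by omega) (by omega)]
    rw [mapRange_congr 0 n _ (fun i => (PySem.List.pyRange 0 (i + 1) 1).map
        (fun j => cellD n k (a + 1) i j))
      (fun x h1 h2 => by
        beta_reduce
        by_cases hx : x = a
        · rw [if_pos hx, hx]
        · rw [if_neg hx]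
          exact mapRange_congr 0 (x + 1) _ _ (fun j hj1 hj2 => by
            beta_reduce
            unfold cellD lay
            split_ifs <;> omega))]
    rw [show SS n k + 1 + (a - 2 * k) + 1 = SS n k + 1 + (a + 1 - 2 * k) from by ring]
    exact ih (a + 1) (by omega) (by omega)

lemma downPhase_eq (n k : Int) (hk : 0 ≤ k) (hm : 1 ≤ n - 3 * k) :
    downPhase (triOf n (cellK n k)) (SS n k + 1) (n - 1 - k) (2 * k) (n - k) k
      = (triOf n (cellH n k), SS n k + 2 * (n - 3 * k)) := by
  unfold downPhase
  rw [show triOf n (cellK n k) = triOf n (cellD n k (2 * k)) from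
    triOf_congr n _ _ (fun i j h1 h2 h3 h4 => by unfold cellK cellD lay; split_ifs <;> omega)]
  rw [show SS n k + 1 = SS n k + 1 + (2 * k - 2 * k) from by ring]
  exact downPhase_aux n k hk hm (n - 1 - k - 2 * k).toNat (2 * k) (by omega) (by omega)

-- up phase
lemma upPhase_aux (n k : Int) (hk : 0 ≤ k) (hm : 3 ≤ n - 3 * k) :
    ∀ (cnt : Nat) (a : Int), a = 2 * k + cnt → a ≤ n - 2 - k →
    (PySem.List.pyRange a (-1 + 2 * k) (-1)).foldl
      (fun st i =>
        let t := PySem.List.pyGetD st.1 i []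
        let r := fillUp t st.2
          (PySem.List.pyRange (PySem.List.len t - 1 - k) (-1 + k) (-1))
        (PySem.List.pySetD st.1 i r.1, r.2))
      (triOf n (cellU n k a), SS n k + 2 * (n - 3 * k) + (n - 2 - k - a))
      = (triOf n (cellK n (k + 1)), SS n k + 3 * (n - 3 * k) - 2) := by
  intro cnt
  induction cnt with
  | zero =>
    intro a ha hle
    have haeq : a = 2 * k := by omega
    subst haeq
    rw [PySem.List.pyRange_neg_one_cons (by omega : -1 + 2 * k < 2 * k), List.foldl_cons,
      PySem.List.pyRange_neg_one_eq_nil (by omega : 2 * k - 1 ≤ -1 + 2 * k), List.foldl_nil]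
    simp only [pyGetD_triOf n (cellU n k (2 * k)) (2 * k) (by omega) (by omega),
      len_map_pyRange (2 * k + 1) _ (by omega)]
    rw [show (2 * k + 1 - 1 - k : Int) = k from by ring]
    rw [fillUp_none _ _ _ (fun j hj => by
      rw [PySem.List.mem_pyRange_neg_one] at hj
      rw [PySem.List.pyGetD_map_pyRange_of_nonneg _ (2 * k + 1) j 0 (by omega) (by omega)]
      beta_reduce
      intro h
      rw [show cellU n k (2 * k) (2 * k) j = if lay n (2 * k) j < k ∨ (lay n (2 * k) j = k ∧
          (j = k ∨ 2 * k = n - 1 - k ∨ (j = 2 * k - k ∧ 2 * k < 2 * k)))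
          then fA n (2 * k) j else 0 from rfl,
        cell_if_zero n (2 * k) j _ (by omega) (by omega) (by omega)] at h
      exact h (by unfold lay; omega))]
    unfold triOf
    rw [pySetD_map_pyRange _ n (2 * k) _ (by omega) (by omega)]
    rw [mapRange_congr 0 n _ (fun i => (PySem.List.pyRange 0 (i + 1) 1).map
        (fun j => cellK n (k + 1) i j))
      (fun x h1 h2 => by
        beta_reduce
        by_cases hx : x = 2 * k
        · rw [if_pos hx, hx]
          exact mapRange_congr 0 (2 * k + 1) _ _ (fun j hj1 hj2 => by
            beta_reduce
            unfold cellU cellK lay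
            split_ifs <;> omega)
        · rw [if_neg hx]
          exact mapRange_congr 0 (x + 1) _ _ (fun j hj1 hj2 => by
            beta_reduce
            unfold cellU cellK lay
            split_ifs <;> omega))]
    rw [Prod.mk.injEq]
    exact ⟨rfl, by omega⟩
  | succ cnt ih =>
    intro a ha hle
    have halt : 2 * k + 1 ≤ a := by omega
    rw [PySem.List.pyRange_neg_one_cons (by omega : -1 + 2 * k < a), List.foldl_cons]
    simp only [pyGetD_triOf n (cellU n k a) a (by omega) (by omega),
      len_map_pyRange (a + 1) _ (by omega)]
    rw [show (a + 1 - 1 - k : Int) = a - k from by ring]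
    rw [PySem.List.pyRange_neg_one_cons (by omega : -1 + k < a - k)]
    simp only [fillUp]
    rw [PySem.List.pyGetD_map_pyRange_of_nonneg _ (a + 1) (a - k) 0 (by omega) (by omega)]
    rw [show cellU n k a a (a - k) = 0 from by unfold cellU; rw [if_neg (by unfold lay; omega)]]
    rw [if_pos rfl]
    dsimp only
    rw [pySetD_map_pyRange _ (a + 1) (a - k) _ (by omega) (by omega)]
    rw [mapRange_congr 0 (a + 1)
      (fun x => if x = a - k then SS n k + 2 * (n - 3 * k) + (n - 2 - k - a)
        else cellU n k a a x)
      (fun j => cellU n k (a - 1) a j)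
      (fun x h1 h2 => by
        beta_reduce
        by_cases hx : x = a - k
        · rw [if_pos hx, hx]
          unfold cellU
          rw [if_pos (by unfold lay; omega), fA_right n k a hk (by omega) (by omega)]
          omega
        · rw [if_neg hx]
          unfold cellU lay
          split_ifs <;> omega)]
    unfold triOf
    rw [pySetD_map_pyRange _ n a _ (by omega) (by omega)]
    rw [mapRange_congr 0 n _ (fun i => (PySem.List.pyRange 0 (i + 1) 1).map
        (fun j => cellU n k (a - 1) i j))
      (fun x h1 h2 => by
        beta_reduce
        by_cases hx : x = a
        · rw [if_pos hx, hx]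
        · rw [if_neg hx]
          exact mapRange_congr 0 (x + 1) _ _ (fun j hj1 hj2 => by
            beta_reduce
            unfold cellU lay
            split_ifs <;> omega))]
    rw [show SS n k + 2 * (n - 3 * k) + (n - 2 - k - a) + 1
        = SS n k + 2 * (n - 3 * k) + (n - 2 - k - (a - 1)) from by ring]
    exact ih (a - 1) (by omega) (by omega)

lemma upPhase_eq (n k : Int) (hk : 0 ≤ k) (hm : 3 ≤ n - 3 * k) :
    upPhase (triOf n (cellH n k)) (SS n k + 2 * (n - 3 * k)) k (n - 1 - k) (-1 + 2 * k)
      = (triOf n (cellK n (k + 1)), SS n k + 3 * (n - 3 * k) - 2) := by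
  unfold upPhase
  rw [show triOf n (cellH n k) = triOf n (cellU n k (n - 2 - k)) from
    triOf_congr n _ _ (fun i j h1 h2 h3 h4 => by unfold cellH cellU lay; split_ifs <;> omega)]
  rw [PySem.List.pyRange_neg_one_cons (by omega : -1 + 2 * k < n - 1 - k), List.foldl_cons]
  simp only [pyGetD_triOf n (cellU n k (n - 2 - k)) (n - 1 - k) (by omega) (by omega),
    len_map_pyRange (n - 1 - k + 1) _ (by omega)]
  rw [show (n - 1 - k + 1 - 1 - k : Int) = n - 1 - 2 * k from by ring]
  rw [fillUp_none _ _ _ (fun j hj => by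
    rw [PySem.List.mem_pyRange_neg_one] at hj
    rw [PySem.List.pyGetD_map_pyRange_of_nonneg _ (n - 1 - k + 1) j 0 (by omega) (by omega)]
    beta_reduce
    intro h
    rw [show cellU n k (n - 2 - k) (n - 1 - k) j = if lay n (n - 1 - k) j < k ∨
        (lay n (n - 1 - k) j = k ∧ (j = k ∨ n - 1 - k = n - 1 - k ∨
          (j = n - 1 - k - k ∧ n - 2 - k < n - 1 - k)))
        then fA n (n - 1 - k) j else 0 from rfl,
      cell_if_zero n (n - 1 - k) j _ (by omega) (by omega) (by omega)] at h
    exact h (by unfold lay; omega))]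
  unfold triOf
  rw [pySetD_map_pyRange _ n (n - 1 - k) _ (by omega) (by omega)]
  rw [mapRange_congr 0 n _ (fun i => (PySem.List.pyRange 0 (i + 1) 1).map
      (fun j => cellU n k (n - 2 - k) i j))
    (fun x h1 h2 => by
      beta_reduce
      by_cases hx : x = n - 1 - k
      · rw [if_pos hx, hx]
      · rw [if_neg hx])]
  rw [show (n - 1 - k - 1 : Int) = n - 2 - k from by ring,
    show SS n k + 2 * (n - 3 * k) = SS n k + 2 * (n - 3 * k) + (n - 2 - k - (n - 2 - k)) from
      by ring]
  exact upPhase_aux n k hk hm (n - 2 - k - 2 * k).toNat (n - 2 - k) (by omega) (by omega)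

-- the main loop
lemma loop_main (n : Int) : ∀ (fuel : Nat) (k : Int), 0 ≤ k → 1 ≤ n - 3 * k →
    (n - 3 * k).toNat ≤ fuel →
    loopA fuel (triOf n (cellK n k)) true (SS n k + 1) (n - 1 - k) (2 * k) (n - k)
      (n - 1 - k) (-1 + 2 * k) k = triOf n (cellK n n) := by
  intro fuel
  induction fuel using Nat.strong_induction_on with
  | _ fuel ih =>
    intro k hk hm hfuel
    obtain ⟨f, rfl⟩ : ∃ f, fuel = f + 1 := ⟨fuel - 1, by omega⟩
    simp only [loopA]
    rw [downPhase_eq n k hk hm]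
    dsimp only
    rw [flag_triH n k hk hm]
    by_cases h3 : 3 ≤ n - 3 * k
    · rw [if_pos h3, if_pos rfl]
      obtain ⟨f', rfl⟩ : ∃ f', f = f' + 1 := ⟨f - 1, by omega⟩
      simp only [loopA, if_neg Bool.false_ne_true]
      rw [upPhase_eq n k hk h3]
      dsimp only
      rw [flag_triK n (k + 1) (by omega)]
      by_cases h4 : 1 ≤ n - 3 * (k + 1)
      · rw [if_pos h4, if_pos rfl]
        rw [show SS n k + 3 * (n - 3 * k) - 2 = SS n (k + 1) + 1 from by
            have := SS_succ n k; omega,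
          show (n - 1 - k - 1 : Int) = n - 1 - (k + 1) from by ring,
          show (2 * k + 2 : Int) = 2 * (k + 1) from by ring,
          show (n - k - 1 : Int) = n - (k + 1) from by ring,
          show (-1 + 2 * k + 2 : Int) = -1 + 2 * (k + 1) from by ring]
        exact ih f' (by omega) (k + 1) (by omega) h4 (by omega)
      · rw [if_neg h4, if_neg (by norm_num : ¬ ((0 : Int) = 1))]
        exact triOf_congr n _ _ (fun i j h1 h2 h3' h4' => by
          unfold cellK lay
          split_ifs <;> omega)
    · rw [if_neg h3, if_neg (by norm_num : ¬ ((0 : Int) = 1))]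
      exact triOf_congr n _ _ (fun i j h1 h2 h3' h4' => by
        unfold cellH cellK lay
        split_ifs <;> omega)

lemma solution_alt_eq (n : Int) :
    solution_alt n = (triOf n (fun i j => fA n i j)).flatten := by
  unfold solution_alt
  dsimp only
  rw [show (fun (answer : List Int) (i : Int) =>
        (PySem.List.pyRange 0 (i + 1) 1).foldl
          (fun answer j =>
            answer ++ [let l := min j (min (i - j) (n - 1 - i));
              let m := n - 3 * l;
              let s := PySem.Int.floordiv (n * (n + 1)) 2 - PySem.Int.floordiv (m * (m + 1)) 2;
              let i2 := i - 2 * l;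
              let j2 := j - l;
              if j2 = 0 then s + i2 + 1
              else if i2 = m - 1 then s + m + j2
              else s + 2 * m - 1 + (m - 1 - i2)]) answer)
      = (fun (answer : List Int) (i : Int) =>
        answer ++ (PySem.List.pyRange 0 (i + 1) 1).map (fun j => fA n i j)) from
    funext fun answer => funext fun i =>
      PySem.List.foldl_append_singleton_eq_map _ _ answer]
  rw [PySem.List.foldl_append_eq_flatMap, List.flatMap_def, List.nil_append]
  rfl

lemma tri0_eq (n : Int) :
    (PySem.List.pyRange 1 (n + 1) 1).map (fun i => List.replicate i.toNat (0 : Int))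
      = triOf n (cellK n 0) := by
  unfold triOf
  rw [PySem.List.pyRange_one 1 (n + 1), PySem.List.pyRange_one 0 n]
  simp only [List.map_map]
  rw [show (n + 1 - 1).toNat = (n - 0).toNat from by omega]
  apply List.map_congr_left
  intro t ht
  rw [List.mem_range] at ht
  simp only [Function.comp_apply]
  rw [mapRange_congr 0 ((0 : Int) + t + 1) _ (fun _ => (0 : Int)) (fun x h1 h2 => by
    unfold cellK
    rw [if_neg (by unfold lay; omega)])]
  rw [List.map_const', PySem.List.length_pyRange_one]
  congr 1
  omega

-- ===== VERDICT (by name: the statement is the Claim_ definition above) =====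
theorem solution_spec : Claim_equal_solution := by
  intro n hdom
  unfold Spec_solution
  by_cases hn : 1 ≤ n
  · simp only [solution]
    rw [tri0_eq n]
    rw [show PySem.List.len (triOf n (cellK n 0)) = n from
      len_map_pyRange n _ (by omega)]
    have hl := loop_main n (n.toNat + 2) 0 (by omega) (by omega) (by omega)
    simp only [SS_zero, zero_add, add_zero,
      show n - 1 - (0 : Int) = n - 1 from by ring,
      show 2 * (0 : Int) = 0 from by ring,
      show n - (0 : Int) = n from by ring,
      ] at hl
    rw [hl, PySem.List.foldl_append_eq_flatten, List.nil_append, solution_alt_eq]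
    congr 1
    exact triOf_congr n _ _ (fun i j h1 h2 h3 h4 => by
      unfold cellK lay
      split_ifs <;> omega)
  · simp only [solution, solution_alt]
    rw [PySem.List.pyRange_one_eq_nil (by omega : n + 1 ≤ 1),
      PySem.List.pyRange_one_eq_nil (by omega : n ≤ 0),
      show n.toNat = 0 from by omega]
    rfl
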